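-- pv_equiv track=rewrite | github.com/a-mavric/Agenda-Density-Calculator | agendadensity.py | pair_across_full_range
-- ===== SOURCE A (Python) =====
-- def pair_across_full_range(values, full_range):
--
--     on_full_range = []
--
--     FOUND = False
--
--     for x in full_range:
--         for y in values:
--             if y[0] == x:
--                 on_full_range.append(y[1])
--                 FOUND = True
--                 break
--         if not FOUND:
--             on_full_range.append(0)
--         found = False
--
--     return on_full_range
-- ===== SOURCE B (Python) =====
-- def pair_across_full_range(values, full_range):
--     lookup = {}
--     for key, val in values:
--         lookup.setdefault(key, val)
--     return [lookup.get(x, 0) for x in full_range]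
-- ===== Notes on version B (the rewrite author's own statement) =====
-- stated objective: faster
-- what changed: Replaces the nested per-element scan of values (with a latched FOUND flag) by a first-occurrence lookup dict built once and a single map over full_range with default 0.
-- intended difference: On inputs where some element of full_range after the first matching one has no match in values, A's never-reset FOUND flag makes it silently skip those elements (returning a list shorter than full_range), while B returns 0 for them, one output per range element, which is the intended behaviour the dead 'found = False' line shows was meant. — e.g. on pair_across_full_range([(1, 5)], [1, 2]): A returns [5], B returns [5, 0]
import Mathlib
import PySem

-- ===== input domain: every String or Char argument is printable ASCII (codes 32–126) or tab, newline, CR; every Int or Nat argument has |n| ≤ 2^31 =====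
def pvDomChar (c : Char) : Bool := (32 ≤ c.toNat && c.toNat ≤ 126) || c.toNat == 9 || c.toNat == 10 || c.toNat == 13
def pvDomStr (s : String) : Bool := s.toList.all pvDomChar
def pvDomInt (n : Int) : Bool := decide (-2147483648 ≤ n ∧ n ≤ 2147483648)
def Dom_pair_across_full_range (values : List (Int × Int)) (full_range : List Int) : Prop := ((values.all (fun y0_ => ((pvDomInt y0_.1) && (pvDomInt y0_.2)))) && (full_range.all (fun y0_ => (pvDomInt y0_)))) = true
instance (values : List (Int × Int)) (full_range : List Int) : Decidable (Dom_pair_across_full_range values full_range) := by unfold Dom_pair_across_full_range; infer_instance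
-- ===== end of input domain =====

-- ===== PORT A =====
-- B builds a first-occurrence dict once and maps each range element to its value (default 0);
-- where A's never-reset FOUND flag drops unmatched elements after the first match, B returns 0
-- there (the intended one-output-per-range-element behaviour) — stated as D_ below.

-- inner 'for y in values: if y[0] == x: append y[1]; break' — first match, if any
def pvInnerA (values : List (Int × Int)) (x : Int) : Option Int :=
  match values with
  | [] => none
  | y :: rest => if y.1 = x then some y.2 else pvInnerA rest x

-- outer loop: state (on_full_range, FOUND); the dead Python line 'found = False' never resets FOUND
def pvLoopA (values : List (Int × Int)) (fr : List Int) (acc : List Int) (found : Bool) : List Int :=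
  match fr with
  | [] => acc
  | x :: rest =>
    match pvInnerA values x with
    | some v => pvLoopA values rest (acc ++ [v]) true
    | none => pvLoopA values rest (if found then acc else acc ++ [0]) found

def pair_across_full_range (values : List (Int × Int)) (full_range : List Int) : List Int :=
  pvLoopA values full_range [] false

-- ===== PORT B =====
-- 'lookup.setdefault(key, val)' for each pair of values
def pvLookup (values : List (Int × Int)) : PySem.Dict Int Int :=
  values.foldl (fun d y => if (d.get? y.1).isSome then d else d.insert y.1 y.2) PySem.Dict.empty

def pair_across_full_range_alt (values : List (Int × Int)) (full_range : List Int) : List Int :=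
  let lookup := pvLookup values
  full_range.map (fun x => (lookup.get? x).getD 0)

-- ===== PRECONDITION & SPEC =====
-- On inputs where some element of full_range after the first matching one has no match in values,
-- A's never-reset FOUND flag silently skips those elements (output shorter than full_range); B
-- returns 0 for them, one output per range element, which the dead 'found = False' line shows was intended.
def D_pair_across_full_range (values : List (Int × Int)) (full_range : List Int) : Prop :=
  ((full_range.dropWhile (fun x => !(values.any (fun y => y.1 == x)))).any
      (fun x => !(values.any (fun y => y.1 == x)))) = true
instance (values : List (Int × Int)) (full_range : List Int) : Decidable (D_pair_across_full_range values full_range) := by unfold D_pair_across_full_range; infer_instance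

def Spec_pair_across_full_range (values : List (Int × Int)) (full_range : List Int) (out : List Int) : Prop := ¬ D_pair_across_full_range values full_range → out = pair_across_full_range_alt values full_range
instance (values : List (Int × Int)) (full_range : List Int) (out : List Int) : Decidable (Spec_pair_across_full_range values full_range out) := by unfold Spec_pair_across_full_range; infer_instance

def pvDiffWitness_pair_across_full_range : (List (Int × Int)) × List Int := ([(1, 5)], [1, 2])
def pvDiffWitnessOut_pair_across_full_range : (List Int) × (List Int) := ([5], [5, 0])

-- ===== CLAIM (what is proved, stated in full; the proofs are below) =====
def Claim_unchanged_pair_across_full_range : Prop := ∀ (values : List (Int × Int)) (full_range : List Int), Dom_pair_across_full_range values full_range → Spec_pair_across_full_range values full_range (pair_across_full_range values full_range)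
def Claim_changed_pair_across_full_range : Prop := Dom_pair_across_full_range (pvDiffWitness_pair_across_full_range.1) (pvDiffWitness_pair_across_full_range.2) ∧ D_pair_across_full_range (pvDiffWitness_pair_across_full_range.1) (pvDiffWitness_pair_across_full_range.2) ∧ pair_across_full_range (pvDiffWitness_pair_across_full_range.1) (pvDiffWitness_pair_across_full_range.2) = pvDiffWitnessOut_pair_across_full_range.1 ∧ pair_across_full_range_alt (pvDiffWitness_pair_across_full_range.1) (pvDiffWitness_pair_across_full_range.2) = pvDiffWitnessOut_pair_across_full_range.2 ∧ pvDiffWitnessOut_pair_across_full_range.1 ≠ pvDiffWitnessOut_pair_across_full_range.2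
def Claim_exact_pair_across_full_range : Prop := ∀ (values : List (Int × Int)) (full_range : List Int), Dom_pair_across_full_range values full_range → D_pair_across_full_range values full_range → pair_across_full_range values full_range ≠ pair_across_full_range_alt values full_range

-- ===== LEMMAS AND PROOFS =====

-- the dict of first occurrences answers exactly like A's inner first-match scan
theorem pvLookup_get (values : List (Int × Int)) (x : Int) :
    (pvLookup values).get? x = pvInnerA values x := by
  have gen : ∀ (vs : List (Int × Int)) (d : PySem.Dict Int Int),
      (vs.foldl (fun d y => if (d.get? y.1).isSome then d else d.insert y.1 y.2) d).get? x =
        ((d.get? x).elim (pvInnerA vs x) some) := by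
    intro vs
    induction vs with
    | nil => intro d; cases h : d.get? x <;> simp [pvInnerA, h]
    | cons y rest ih =>
      intro d
      simp only [List.foldl_cons]
      by_cases hs : (d.get? y.1).isSome
      · simp only [hs, if_pos]
        rw [ih d]
        by_cases hx : y.1 = x
        · subst hx
          obtain ⟨v, hv⟩ := Option.isSome_iff_exists.mp hs
          simp [hv, pvInnerA]
        · simp [pvInnerA, hx]
      · simp only [hs, if_neg, Bool.false_eq_true, not_false_iff]
        rw [ih]
        by_cases hx : y.1 = x
        · subst hx
          have hd : d.get? y.1 = none := Option.not_isSome_iff_eq_none.mp hs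
          simp [hd, PySem.Dict.get?_insert_self, pvInnerA]
        · rw [PySem.Dict.get?_insert_of_ne _ _ (Ne.symm hx)]
          by_cases hd : (d.get? x).isSome
          · obtain ⟨v, hv⟩ := Option.isSome_iff_exists.mp hd
            simp [hv]
          · have hd' : d.get? x = none := Option.not_isSome_iff_eq_none.mp hd
            simp [hd', pvInnerA, hx]
  have := gen values PySem.Dict.empty
  simpa [PySem.Dict.get?_empty] using this

-- membership test of D_ = A's inner scan succeeds
theorem pvAny_eq_isSome (values : List (Int × Int)) (x : Int) :
    (values.any (fun y => y.1 == x)) = (pvInnerA values x).isSome := by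
  induction values with
  | nil => simp [pvInnerA]
  | cons y rest ih =>
    by_cases hx : y.1 = x <;> simp [pvInnerA, hx, ih]

-- once FOUND is latched, A appends exactly the matched values
theorem pvLoopA_found (values : List (Int × Int)) (fr : List Int) (acc : List Int) :
    pvLoopA values fr acc true = acc ++ fr.filterMap (fun x => pvInnerA values x) := by
  induction fr generalizing acc with
  | nil => simp [pvLoopA]
  | cons x rest ih =>
    cases h : pvInnerA values x with
    | some v => simp [pvLoopA, h, ih]
    | none => simp [pvLoopA, h, ih]

-- outside D_: A = B
theorem pvLoopA_eq_map (values : List (Int × Int)) (fr : List Int) (acc : List Int)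
    (hD : ¬ D_pair_across_full_range values fr) :
    pvLoopA values fr acc false = acc ++ fr.map (fun x => (pvInnerA values x).getD 0) := by
  induction fr generalizing acc with
  | nil => simp [pvLoopA]
  | cons x rest ih =>
    cases h : pvInnerA values x with
    | some v =>
      have hx : (values.any (fun y => y.1 == x)) = true := by
        rw [pvAny_eq_isSome, h]; rfl
      have hall : ∀ z ∈ rest, (pvInnerA values z).isSome := by
        intro z hz
        by_contra hzn
        apply hD
        unfold D_pair_across_full_range
        simp only [List.dropWhile_cons, Bool.not_true, Bool.false_eq_true, if_neg,
          not_false_iff, List.any_cons, hx, Bool.not_true, Bool.false_or]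
        refine List.any_eq_true.mpr ⟨z, hz, ?_⟩
        rw [pvAny_eq_isSome]
        simp [Option.not_isSome_iff_eq_none.mp hzn]
      have hfm : rest.filterMap (fun z => pvInnerA values z) =
          rest.map (fun z => (pvInnerA values z).getD 0) := by
        clear hD ih
        induction rest with
        | nil => rfl
        | cons z t iht =>
          have hz := hall z (by simp)
          obtain ⟨w, hw⟩ := Option.isSome_iff_exists.mp hz
          simp [hw, iht (fun u hu => hall u (by simp [hu]))]
      simp [pvLoopA, h, pvLoopA_found, hfm]
    | none =>
      have hx : (values.any (fun y => y.1 == x)) = false := by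
        rw [pvAny_eq_isSome, h]; rfl
      have hD' : ¬ D_pair_across_full_range values rest := by
        intro hr
        apply hD
        unfold D_pair_across_full_range at *
        simpa [List.dropWhile_cons, hx] using hr
      simp only [pvLoopA, h, Bool.false_eq_true, if_neg, not_false_iff]
      rw [ih _ hD']
      simp [h]

-- inside D_: A's output is strictly shorter than full_range
theorem pvFilterMap_lt (values : List (Int × Int)) (fr : List Int)
    (h : ∃ z ∈ fr, pvInnerA values z = none) :
    (fr.filterMap (fun x => pvInnerA values x)).length < fr.length := by
  induction fr with
  | nil => simp at h
  | cons x rest ih =>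
    obtain ⟨z, hz, hzn⟩ := h
    cases h0 : pvInnerA values x with
    | none =>
      simp only [List.filterMap_cons, h0, List.length_cons]
      exact Nat.lt_succ_of_le (List.length_filterMap_le _ _)
    | some v =>
      simp only [List.filterMap_cons, h0, List.length_cons, Nat.succ_lt_succ_iff]
      rcases List.mem_cons.mp hz with rfl | hz'
      · rw [h0] at hzn; cases hzn
      · exact ih ⟨z, hz', hzn⟩

theorem pvLoopA_len_lt (values : List (Int × Int)) (fr : List Int) (acc : List Int)
    (hD : D_pair_across_full_range values fr) :
    (pvLoopA values fr acc false).length < acc.length + fr.length := by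
  induction fr generalizing acc with
  | nil => unfold D_pair_across_full_range at hD; simp at hD
  | cons x rest ih =>
    cases h : pvInnerA values x with
    | some v =>
      have hx : (values.any (fun y => y.1 == x)) = true := by
        rw [pvAny_eq_isSome, h]; rfl
      have hex : ∃ z ∈ rest, pvInnerA values z = none := by
        unfold D_pair_across_full_range at hD
        simp only [List.dropWhile_cons, Bool.not_true, Bool.false_eq_true, if_neg,
          not_false_iff, List.any_cons, hx, Bool.not_true, Bool.false_or] at hD
        obtain ⟨z, hz, hzn⟩ := List.any_eq_true.mp hD
        rw [pvAny_eq_isSome] at hzn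
        exact ⟨z, hz, by
          cases hc : pvInnerA values z
          · rfl
          · rw [hc] at hzn; simp at hzn⟩
      have := pvFilterMap_lt values rest hex
      simp only [pvLoopA, h, pvLoopA_found, List.length_append, List.length_cons,
        List.length_nil]
      omega
    | none =>
      have hx : (values.any (fun y => y.1 == x)) = false := by
        rw [pvAny_eq_isSome, h]; rfl
      have hD' : D_pair_across_full_range values rest := by
        unfold D_pair_across_full_range at *
        simpa [List.dropWhile_cons, hx] using hD
      simp only [pvLoopA, h, Bool.false_eq_true, if_neg, not_false_iff]
      have := ih (acc ++ [0]) hD'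
      simp only [List.length_append, List.length_cons, List.length_nil] at this ⊢
      omega

-- ===== VERDICT (by name: the statement is the Claim_ definition above) =====
theorem pair_across_full_range_spec : Claim_unchanged_pair_across_full_range := by
  intro values full_range _ hD
  unfold pair_across_full_range pair_across_full_range_alt
  rw [pvLoopA_eq_map values full_range [] hD]
  simp [pvLookup_get]

theorem pair_across_full_range_changed : Claim_changed_pair_across_full_range := by
  unfold Claim_changed_pair_across_full_range; decide

theorem pair_across_full_range_tight : Claim_exact_pair_across_full_range := by
  intro values full_range _ hD heq
  have h1 := pvLoopA_len_lt values full_range [] hD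
  have h2 : (pair_across_full_range_alt values full_range).length = full_range.length := by
    simp [pair_across_full_range_alt]
  have := congrArg List.length heq
  unfold pair_across_full_range at this
  simp only [List.length_nil, Nat.zero_add] at h1
  omega
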